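-- pv_equiv track=rewrite | github.com/BitR13x/Binary-Analysis | analyzers/anti_debug_detector.py | _detect_timing_attacks
-- ===== SOURCE A (Python) =====
-- from typing import Dict, List, Any
--
-- def _detect_timing_attacks(strings: List[str]) -> List[str]:
--     """Detect timing-based anti-debug techniques"""
--     timing_functions = [
--         'rdtsc', 'rdtscp', 'QueryPerformanceCounter', 'GetTickCount',
--         'timeGetTime', 'gettimeofday', 'clock_gettime', 'clock',
--         'time', 'ftime', 'GetSystemTime'
--     ]
--
--     found_timing = []
--     combined_strings = ' '.join(strings).lower()
--
--     for func in timing_functions: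
--         if func.lower() in combined_strings:
--             found_timing.append(func)
--
--     return found_timing
-- ===== SOURCE B (Python) =====
-- from typing import Dict, List, Any
--
-- def _detect_timing_attacks(strings: List[str]) -> List[str]:
--     """Detect timing-based anti-debug techniques"""
--     timing_functions = [
--         'rdtsc', 'rdtscp', 'QueryPerformanceCounter', 'GetTickCount',
--         'timeGetTime', 'gettimeofday', 'clock_gettime', 'clock',
--         'time', 'ftime', 'GetSystemTime'
--     ]
--     return [func for func in timing_functions
--             if any(func.lower() in s.lower() for s in strings)]
-- ===== Notes on version B (the rewrite author's own statement) =====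
-- stated objective: alternative
-- what changed: B drops the ' '.join preprocessing: instead of building one combined lowercased haystack and scanning it, it filters the candidate names by testing each directly against every input string (any(func.lower() in s.lower() for s in strings)); equivalent because the names contain no space, so no match can cross the join separator.
import Mathlib
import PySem

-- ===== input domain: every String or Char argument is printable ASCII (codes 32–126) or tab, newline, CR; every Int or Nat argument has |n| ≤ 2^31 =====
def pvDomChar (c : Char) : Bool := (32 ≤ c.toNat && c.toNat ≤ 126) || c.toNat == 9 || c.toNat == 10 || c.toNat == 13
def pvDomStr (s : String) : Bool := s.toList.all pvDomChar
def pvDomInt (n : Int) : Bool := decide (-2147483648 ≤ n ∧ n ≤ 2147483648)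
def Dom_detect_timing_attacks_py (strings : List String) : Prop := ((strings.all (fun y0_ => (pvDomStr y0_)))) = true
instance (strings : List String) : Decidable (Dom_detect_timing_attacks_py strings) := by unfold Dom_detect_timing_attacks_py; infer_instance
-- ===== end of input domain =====

-- B replaces A's "join everything into one lowercased haystack then scan it" with a direct
-- per-candidate filter over the individual strings (alternative decomposition, same cost).


-- ===== PORT A =====
def pvTimingFunctions : List String :=
  ["rdtsc", "rdtscp", "QueryPerformanceCounter", "GetTickCount",
   "timeGetTime", "gettimeofday", "clock_gettime", "clock",
   "time", "ftime", "GetSystemTime"]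

def detect_timing_attacks_py (strings : List String) : List String :=
  let combined_strings := PySem.Str.lower (PySem.Str.join " " strings)
  pvTimingFunctions.foldl
    (fun found_timing func =>
      if PySem.Str.isIn (PySem.Str.lower func) combined_strings
      then found_timing ++ [func] else found_timing) []

-- ===== PORT B =====
def detect_timing_attacks_py_alt (strings : List String) : List String :=
  pvTimingFunctions.filter
    (fun func => strings.any (fun s => PySem.Str.isIn (PySem.Str.lower func) (PySem.Str.lower s)))

-- ===== PRECONDITION & SPEC =====
def Spec_detect_timing_attacks_py (strings : List String) (out : List String) : Prop := out = detect_timing_attacks_py_alt strings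
instance (strings : List String) (out : List String) : Decidable (Spec_detect_timing_attacks_py strings out) := by unfold Spec_detect_timing_attacks_py; infer_instance

-- ===== CLAIM (what is proved, stated in full; the proofs are below) =====
def Claim_equal_detect_timing_attacks_py : Prop := ∀ (strings : List String), Dom_detect_timing_attacks_py strings → Spec_detect_timing_attacks_py strings (detect_timing_attacks_py strings)

-- ===== LEMMAS AND PROOFS =====

-- A space-free pattern that is a prefix of a ++ ' ' :: b is a prefix of a.
theorem pv_prefix_split {p a b : List Char} (hsp : ' ' ∉ p)
    (h : p <+: a ++ ' ' :: b) : p <+: a := by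
  induction p generalizing a with
  | nil => exact List.nil_prefix
  | cons q p' ih =>
    cases a with
    | nil =>
      rcases List.cons_prefix_cons.mp h with ⟨hq, -⟩
      exact absurd (hq ▸ List.mem_cons_self) hsp
    | cons d a' =>
      rcases List.cons_prefix_cons.mp h with ⟨hq, h'⟩
      have hsp' : ' ' ∉ p' := fun hm => hsp (List.mem_cons_of_mem _ hm)
      exact hq ▸ List.cons_prefix_cons.mpr ⟨rfl, ih hsp' h'⟩

-- A space-free pattern infix in a ++ ' ' :: b is infix in a or in b.
theorem pv_infix_split {p a b : List Char} (hsp : ' ' ∉ p)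
    (h : p <:+: a ++ ' ' :: b) : p <:+: a ∨ p <:+: b := by
  induction a with
  | nil =>
    rcases List.infix_cons_iff.mp h with hpre | hinf
    · cases p with
      | nil => exact Or.inl List.nil_infix
      | cons q p' =>
        rcases List.cons_prefix_cons.mp hpre with ⟨hq, -⟩
        exact absurd (hq ▸ List.mem_cons_self) hsp
    · exact Or.inr hinf
  | cons d a' ih =>
    rcases List.infix_cons_iff.mp h with hpre | hinf
    · exact Or.inl (pv_prefix_split hsp hpre).isInfix
    · rcases ih hinf with h1 | h2
      · exact Or.inl (List.infix_cons h1)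
      · exact Or.inr h2

-- A nonempty space-free pattern is infix in ' '.join(xs) iff it is infix in some element.
theorem pv_infix_join_iff (p : List Char) (hp : p ≠ []) (hsp : ' ' ∉ p)
    (xs : List (List Char)) :
    p <:+: PySem.Chars.join [' '] xs ↔ ∃ x ∈ xs, p <:+: x := by
  induction xs with
  | nil =>
    simp only [PySem.Chars.join_nil, List.infix_nil]
    simp [hp]
  | cons x rest ih =>
    cases rest with
    | nil =>
      simp [PySem.Chars.join_singleton]
    | cons y rest' =>
      rw [PySem.Chars.join_cons_cons]
      constructor
      · intro h
        rcases pv_infix_split hsp (by simpa using h) with h1 | h2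
        · exact ⟨x, List.mem_cons_self, h1⟩
        · rcases ih.mp h2 with ⟨z, hz, hzi⟩
          exact ⟨z, List.mem_cons_of_mem _ hz, hzi⟩
      · rintro ⟨z, hz, hzi⟩
        rcases List.mem_cons.mp hz with rfl | hz'
        · refine hzi.trans ?_
          rw [List.append_assoc]
          exact (List.prefix_append _ _).isInfix
        · have : p <:+: PySem.Chars.join [' '] (y :: rest') := ih.mpr ⟨z, hz', hzi⟩
          refine this.trans ?_
          simpa using (List.suffix_append (x ++ [' ']) (PySem.Chars.join [' '] (y :: rest'))).isInfix

-- lower distributes over ' '.join (lowerChar ' ' = ' ').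
theorem pv_lower_join (xs : List (List Char)) :
    PySem.Chars.lower (PySem.Chars.join [' '] xs)
      = PySem.Chars.join [' '] (xs.map PySem.Chars.lower) := by
  induction xs with
  | nil => simp [PySem.Chars.join_nil, PySem.Chars.lower]
  | cons x rest ih =>
    cases rest with
    | nil => simp [PySem.Chars.join_singleton, PySem.Chars.lower]
    | cons y rest' =>
      rw [PySem.Chars.join_cons_cons, List.map_cons, List.map_cons,
        PySem.Chars.join_cons_cons, ← List.map_cons, ← ih]
      have hsc : PySem.Chars.lowerChar ' ' = ' ' := by decide
      simp [PySem.Chars.lower, List.map_append, hsc]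

-- The per-candidate condition of A equals the per-candidate condition of B.
theorem pv_cond_eq (strings : List String) (func : String)
    (hp : PySem.Chars.lower func.toList ≠ [])
    (hsp : ' ' ∉ PySem.Chars.lower func.toList) :
    PySem.Str.isIn (PySem.Str.lower func) (PySem.Str.lower (PySem.Str.join " " strings))
      = strings.any (fun s => PySem.Str.isIn (PySem.Str.lower func) (PySem.Str.lower s)) := by
  rw [Bool.eq_iff_iff, PySem.Str.isIn_iff_infix, List.any_eq_true]
  have hjoin : (PySem.Str.lower (PySem.Str.join " " strings)).toList
      = PySem.Chars.join [' '] ((strings.map String.toList).map PySem.Chars.lower) := by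
    rw [PySem.Str.toList_lower, PySem.Str.toList_join, ← pv_lower_join]
    rfl
  rw [hjoin, PySem.Str.toList_lower,
    pv_infix_join_iff _ hp hsp]
  constructor
  · rintro ⟨x, hx, hxi⟩
    simp only [List.mem_map] at hx
    rcases hx with ⟨cs, hcs, rfl⟩
    rcases hcs with ⟨s, hs, rfl⟩
    exact ⟨s, hs, by rw [PySem.Str.isIn_iff_infix, PySem.Str.toList_lower, PySem.Str.toList_lower]; exact hxi⟩
  · rintro ⟨s, hs, hsi⟩
    rw [PySem.Str.isIn_iff_infix, PySem.Str.toList_lower, PySem.Str.toList_lower] at hsi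
    exact ⟨PySem.Chars.lower s.toList, by
      simp only [List.mem_map]; exact ⟨s.toList, ⟨s, hs, rfl⟩, rfl⟩, hsi⟩

-- ===== VERDICT (by name: the statement is the Claim_ definition above) =====
theorem detect_timing_attacks_py_spec : Claim_equal_detect_timing_attacks_py := by
  intro strings _
  unfold Spec_detect_timing_attacks_py detect_timing_attacks_py detect_timing_attacks_py_alt
  show List.foldl
      (fun acc func =>
        if PySem.Str.isIn (PySem.Str.lower func) (PySem.Str.lower (PySem.Str.join " " strings))
        then acc ++ [id func] else acc) [] pvTimingFunctions = _
  rw [PySem.List.foldl_append_if]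
  rw [List.map_id, List.nil_append]
  refine List.filter_congr ?_
  intro func hfunc
  have hnames : PySem.Chars.lower func.toList ≠ [] ∧ ' ' ∉ PySem.Chars.lower func.toList := by
    fin_cases hfunc <;> exact ⟨by decide, by decide⟩
  exact pv_cond_eq strings func hnames.1 hnames.2
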